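-- pv_equiv track=rewrite | github.com/kkr010128/codebert | problem103/problem103_28.py | million
-- ===== SOURCE A (Python) =====
-- def million(n, a):
--     wallet = 1000
--     i = 0
--     while i < n - 1:
--         highest_price = a[i]
--         cheapest_price = a[i]
--         # 直近の最高値と最安値を取得する
--         for j in range(i + 1, n):
--             if highest_price > a[j]:
--                 break
--             if highest_price < a[j]:
--                 highest_price = a[j]
--             if cheapest_price > a[j]:
--                 cheapest_price = a[j]
--         if highest_price > cheapest_price:
--             # 取引する
--             stock = wallet // cheapest_price
--             wallet = wallet - stock * cheapest_price
--             wallet = wallet + stock * highest_price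
--             i = j
--         else:
--             i += 1
--     return wallet
-- ===== SOURCE B (Python) =====
-- def _trade(wallet, buy, sell):
--     if sell > buy:
--         stock = wallet // buy
--         wallet = wallet + stock * (sell - buy)
--     return wallet
--
-- def million(n, a):
--     wallet = 1000
--     if n < 2:
--         return wallet
--     buy = a[0]
--     prev = a[0]
--     for k in range(1, n):
--         c = a[k]
--         if c < prev:
--             wallet = _trade(wallet, buy, prev)
--             buy = c
--         prev = c
--     return _trade(wallet, buy, prev)
-- ===== Notes on version B (the rewrite author's own statement) =====
-- stated objective: faster
-- what changed: A restarts from each position i and re-scans the whole non-decreasing run with an inner for-loop (quadratic on flat runs); B is a single left-to-right pass that tracks (buy, prev) and settles a trade at each descent, visiting every element exactly once.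
-- outside the precondition, e.g. on million(3, [1, 0, -1]): A returns 1000, B returns 1000
import Mathlib
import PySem

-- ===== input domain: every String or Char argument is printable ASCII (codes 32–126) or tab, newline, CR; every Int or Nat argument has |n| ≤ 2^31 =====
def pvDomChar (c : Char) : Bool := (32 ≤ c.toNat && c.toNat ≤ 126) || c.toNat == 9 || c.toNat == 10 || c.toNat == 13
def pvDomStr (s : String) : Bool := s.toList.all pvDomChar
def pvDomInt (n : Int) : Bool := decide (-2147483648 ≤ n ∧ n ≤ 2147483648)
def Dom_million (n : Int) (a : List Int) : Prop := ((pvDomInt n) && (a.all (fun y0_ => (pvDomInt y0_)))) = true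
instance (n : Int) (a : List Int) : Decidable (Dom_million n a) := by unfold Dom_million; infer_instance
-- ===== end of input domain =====

-- B replaces A's restart-from-i rescans by ONE left-to-right pass that trades at each descent
-- (objective: faster on inputs with long flat runs, where A re-scans; equal return value everywhere in Pre_).

-- a[i] (indices are provably ≥ 0 along every execution; out-of-range is excluded by Pre_)
def pvGet (a : List Int) (i : Int) : Int := PySem.List.pyGetD a i 0

-- ===== PORT A =====
-- inner 'for j in range(i+1, n)' with break; fuel (n-j).toNat is exact: fuel 0 coincides with loop exhaustion
def innerA (a : List Int) (n : Int) : Nat → Int → Int → Int → Int × Int × Int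
  | 0, highest, cheapest, j => (highest, cheapest, j - 1)
  | fuel+1, highest, cheapest, j =>
    if j < n then
      let aj := pvGet a j
      if highest > aj then (highest, cheapest, j)
      else
        let h' := if highest < aj then aj else highest
        let c' := if cheapest > aj then aj else cheapest
        innerA a n fuel h' c' (j+1)
    else (highest, cheapest, j - 1)

-- outer 'while i < n - 1'; i strictly increases, so fuel n.toNat + 1 never runs out on Pre_ inputs
def loopA (a : List Int) (n : Int) : Nat → Int → Int → Int
  | 0, wallet, _ => wallet
  | fuel+1, wallet, i =>
    if i < n - 1 then
      let hp := pvGet a i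
      let r := innerA a n (n - (i+1)).toNat hp hp (i+1)
      if r.1 > r.2.1 then
        let stock := PySem.Int.floordiv wallet r.2.1
        let w1 := wallet - stock * r.2.1
        let w2 := w1 + stock * r.1
        loopA a n fuel w2 r.2.2
      else
        loopA a n fuel wallet (i+1)
    else wallet

def million (n : Int) (a : List Int) : Int := loopA a n (n.toNat + 1) 1000 0

-- ===== PORT B =====
def tradeB (wallet buy sell : Int) : Int :=
  if sell > buy then wallet + (PySem.Int.floordiv wallet buy) * (sell - buy) else wallet

-- 'for k in range(1, n)' followed by the final trade; fuel (n-k).toNat is exact: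
-- fuel 0 coincides with the end of the range, where Source B performs the final trade
def loopB (a : List Int) (n : Int) : Nat → Int → Int → Int → Int → Int
  | 0, wallet, buy, prev, _ => tradeB wallet buy prev
  | fuel+1, wallet, buy, prev, k =>
    if k < n then
      let c := pvGet a k
      if c < prev then loopB a n fuel (tradeB wallet buy prev) c c (k+1)
      else loopB a n fuel wallet buy c (k+1)
    else tradeB wallet buy prev

def million_alt (n : Int) (a : List Int) : Int :=
  if n < 2 then 1000
  else loopB a n (n - 1).toNat 1000 (pvGet a 0) (pvGet a 0) 1

-- ===== PRECONDITION & SPEC =====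
-- Pre_ excludes inputs where Python A raises: n ≥ 2 with fewer than n prices (IndexError) and
-- zero prices among the first n-1 (possible ZeroDivisionError); it is slightly narrower than the
-- raise set, excluding some zero-containing inputs on which A happens to return (see cites).
def Pre_million (n : Int) (a : List Int) : Prop :=
  n ≤ 1 ∨ (n ≤ a.length ∧ ∀ x ∈ a.take (n-1).toNat, x ≠ 0)
instance (n : Int) (a : List Int) : Decidable (Pre_million n a) := by unfold Pre_million; infer_instance
def pvWitness_million : Int × List Int := (4, [3, 1, 2, 5])

def Spec_million (n : Int) (a : List Int) (out : Int) : Prop := out = million_alt n a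
instance (n : Int) (a : List Int) (out : Int) : Decidable (Spec_million n a out) := by unfold Spec_million; infer_instance

-- ===== CLAIM (what is proved, stated in full; the proofs are below) =====
def Claim_equal_million : Prop := ∀ (n : Int) (a : List Int), Dom_million n a → Pre_million n a → Spec_million n a (million n a)

-- ===== LEMMAS AND PROOFS =====

theorem innerA_cheapest (a : List Int) (n : Int) :
    ∀ (fuel : Nat) (h c j : Int), c ≤ h → (innerA a n fuel h c j).2.1 = c := by
  intro fuel
  induction fuel with
  | zero => intro h c j _; simp [innerA]
  | succ m ih =>
    intro h c j hch
    simp only [innerA]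
    split
    · split
      · rfl
      · rename_i hjn hbr
        rw [if_neg (show ¬ c > pvGet a j by omega)]
        apply ih
        split <;> omega
    · rfl

theorem innerA_highest_ge (a : List Int) (n : Int) :
    ∀ (fuel : Nat) (h c j : Int), h ≤ (innerA a n fuel h c j).1 := by
  intro fuel
  induction fuel with
  | zero => intro h c j; simp [innerA]
  | succ m ih =>
    intro h c j
    simp only [innerA]
    split
    · split
      · rfl
      · rename_i hjn hbr
        split
        · rename_i hlt
          have := ih (pvGet a j) (if c > pvGet a j then pvGet a j else c) (j+1)
          omega
        · exact ih h (if c > pvGet a j then pvGet a j else c) (j+1)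
    · rfl

theorem innerA_j_ge (a : List Int) (n : Int) :
    ∀ (fuel : Nat) (h c j : Int), j - 1 ≤ (innerA a n fuel h c j).2.2 := by
  intro fuel
  induction fuel with
  | zero => intro h c j; simp [innerA]
  | succ m ih =>
    intro h c j
    simp only [innerA]
    split
    · split
      · simp
      · have := ih (if h < pvGet a j then pvGet a j else h) (if c > pvGet a j then pvGet a j else c) (j+1)
        omega
    · simp

-- consuming one whole non-decreasing run of B's pass corresponds to one call of A's inner loop
theorem inner_b (a : List Int) (n : Int) :
    ∀ (m : Nat) (j w c h : Int), (n - j).toNat = m → c ≤ h →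
      loopB a n m w c h j =
        loopB a n (n - ((innerA a n m h c j).2.2 + 1)).toNat
          (tradeB w c (innerA a n m h c j).1)
          (pvGet a (innerA a n m h c j).2.2) (pvGet a (innerA a n m h c j).2.2)
          ((innerA a n m h c j).2.2 + 1) := by
  intro m
  induction m with
  | zero =>
    intro j w c h hm hch
    have hjn : ¬ j < n := by omega
    simp only [innerA, loopB]
    have h0 : (n - (j - 1 + 1)).toNat = 0 := by omega
    rw [h0]
    simp [loopB, tradeB]
  | succ m ih =>
    intro j w c h hm hch
    have hjn : j < n := by omega
    simp only [innerA, loopB, if_pos hjn]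
    by_cases hbr : h > pvGet a j
    · -- break: a dip at j
      simp only [if_pos hbr]
      have hm' : (n - (j + 1)).toNat = m := by omega
      rw [hm']
    · -- run continues
      simp only [if_neg hbr]
      have hh' : (if h < pvGet a j then pvGet a j else h) = pvGet a j := by split <;> omega
      have hc' : (if c > pvGet a j then pvGet a j else c) = c := by split <;> omega
      rw [hh', hc']
      exact ih (j+1) w c (pvGet a j) (by omega) (by omega)

-- the main correspondence: A's outer loop at position i versus B's pass restarted at i
theorem mainLemma (a : List Int) (n : Int) :
    ∀ (fA : Nat) (i w : Int), (n - i).toNat ≤ fA →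
      loopA a n fA w i = loopB a n (n - (i+1)).toNat w (pvGet a i) (pvGet a i) (i+1) := by
  intro fA
  induction fA with
  | zero =>
    intro i w hf
    have h0 : (n - (i+1)).toNat = 0 := by omega
    have hni : ¬ i < n - 1 := by omega
    rw [h0]
    simp [loopA, loopB, tradeB]
  | succ fA ih =>
    intro i w hf
    by_cases hi : i < n - 1
    · simp only [loopA, if_pos hi]
      set r := innerA a n (n - (i+1)).toNat (pvGet a i) (pvGet a i) (i+1) with hr
      have hC : r.2.1 = pvGet a i := innerA_cheapest a n _ _ _ _ le_rfl
      have hH : pvGet a i ≤ r.1 := innerA_highest_ge a n _ _ _ _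
      have hJw : i ≤ r.2.2 := by
        have hg := innerA_j_ge a n (n - (i+1)).toNat (pvGet a i) (pvGet a i) (i+1)
        rw [← hr] at hg; omega
      -- r.2.2 ≥ i + 1 : one unfolding of innerA
      have hfpos : ∃ m, (n - (i+1)).toNat = m + 1 := ⟨(n - (i+2)).toNat, by omega⟩
      obtain ⟨m, hmeq⟩ := hfpos
      have hJ : i + 1 ≤ r.2.2 := by
        rw [hr, hmeq]
        simp only [innerA, if_pos (show i + 1 < n by omega)]
        split
        · simp
        · have := innerA_j_ge a n m (if pvGet a i < pvGet a (i+1) then pvGet a (i+1) else pvGet a i)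
            (pvGet a i) (i+1+1)
          omega
      have hIB := inner_b a n (n - (i+1)).toNat (i+1) w (pvGet a i) (pvGet a i) rfl le_rfl
      rw [← hr] at hIB
      by_cases htr : r.1 > r.2.1
      · simp only [if_pos htr]
        rw [ih r.2.2 _ (by omega), hIB]
        have hw : w - PySem.Int.floordiv w r.2.1 * r.2.1 + PySem.Int.floordiv w r.2.1 * r.1
            = tradeB w (pvGet a i) r.1 := by
          rw [hC] at htr ⊢
          simp only [tradeB, if_pos htr]
          ring
        rw [hw]
      · simp only [if_neg htr]
        -- flat run: r.1 = pvGet a i and the next element is ≤ pvGet a i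
        have hHeq : r.1 = pvGet a i := by rw [hC] at htr; omega
        have hnext : pvGet a (i+1) ≤ pvGet a i := by
          by_contra hgt
          rw [not_le] at hgt
          have : pvGet a (i+1) ≤ r.1 := by
            rw [hr, hmeq]
            simp only [innerA, if_pos (show i + 1 < n by omega)]
            rw [if_neg (show ¬ pvGet a i > pvGet a (i+1) by omega),
                if_neg (show ¬ pvGet a i > pvGet a (i+1) by omega)]
            have hset : (if pvGet a i < pvGet a (i+1) then pvGet a (i+1) else pvGet a i) = pvGet a (i+1) := by
              split <;> omega
            rw [hset]
            exact innerA_highest_ge a n m _ _ _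
          omega
        rw [ih (i+1) w (by omega)]
        -- one step of loopB on the left
        rw [hmeq]
        simp only [loopB, if_pos (show i + 1 < n by omega)]
        have hm2 : (n - (i+1+1)).toNat = m := by omega
        by_cases hdip : pvGet a (i+1) < pvGet a i
        · rw [if_pos hdip, hm2]
          simp [tradeB]
        · rw [if_neg hdip, hm2]
          have : pvGet a (i+1) = pvGet a i := by omega
          rw [this]
    · have h0 : (n - (i+1)).toNat = 0 := by omega
      rw [h0]
      simp only [loopA, if_neg hi]
      simp [loopB, tradeB]

-- ===== VERDICT (by name: the statement is the Claim_ definition above) =====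
theorem million_spec : Claim_equal_million := by
  intro n a _ _
  unfold Spec_million million million_alt
  by_cases hn : n < 2
  · rw [if_pos hn]
    have h1 : ¬ (0 : Int) < n - 1 := by omega
    simp only [loopA, if_neg h1]
  · rw [if_neg hn]
    have := mainLemma a n (n.toNat + 1) 0 1000 (by omega)
    simpa using this
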